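-- pv_equiv track=rewrite | github.com/mapramen/competitive | project_euler/134.py | prime_pair_connection
-- ===== SOURCE A (Python) =====
-- def is_prime(n):
-- 	if n < 2:
-- 		return False
--
-- 	if n == 2 or n == 3:
-- 		return True
--
-- 	if n % 2 == 0:
-- 		return False
--
-- 	r, d = 0, n - 1
-- 	while d % 2 == 0:
-- 		r += 1
-- 		d = d // 2
--
-- 	bases = [2, 3, 5, 7, 11, 13, 17, 19, 23, 29, 31, 37, 41, 43, 47, 53, 59, 61, 67, 71, 73, 79, 83, 89, 97]
--
-- 	for a in bases:
-- 		if a >= n: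
-- 			break
--
-- 		x = pow(a, d, n)
--
-- 		for _ in range(r - 1):
-- 			x = (x * x) % n
--
-- 		if x == 1 or x == n - 1:
-- 			continue
--
-- 		return False
--
-- 	return True
--
-- def prime_pair_connection(n):
-- 	ans = 0
--
-- 	previous_prime = 5
-- 	for p in range(7, 2 * n, 2):
-- 		if previous_prime > n:
-- 			break
--
-- 		if not is_prime(p):
-- 			continue
--
-- 		t = 10 ** len(str(previous_prime))
-- 		x = ((p - previous_prime) * pow(t, p - 2, p)) % p
-- 		z = x * t + previous_prime
-- 		ans += z
--
-- 		previous_prime = p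
--
-- 	return ans
-- ===== SOURCE B (Python) =====
-- def is_prime(n):
-- 	if n < 2:
-- 		return False
--
-- 	if n == 2 or n == 3:
-- 		return True
--
-- 	if n % 2 == 0:
-- 		return False
--
-- 	r, d = 0, n - 1
-- 	while d % 2 == 0:
-- 		r += 1
-- 		d = d // 2
--
-- 	bases = [2, 3, 5, 7, 11, 13, 17, 19, 23, 29, 31, 37, 41, 43, 47, 53, 59, 61, 67, 71, 73, 79, 83, 89, 97]
--
-- 	for a in bases:
-- 		if a >= n:
-- 			break
--
-- 		x = pow(a, d, n)
--
-- 		for _ in range(r - 1):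
-- 			x = (x * x) % n
--
-- 		if x == 1 or x == n - 1:
-- 			continue
--
-- 		return False
--
-- 	return True
--
-- def prime_pair_connection(n):
-- 	# Phase 1: collect the consecutive primes 5, 7, 11, ... up to (and including)
-- 	# the first prime exceeding n, never looking past 2*n.
-- 	primes = [5]
-- 	p = 7
-- 	while primes[-1] <= n and p < 2 * n:
-- 		if is_prime(p):
-- 			primes.append(p)
-- 		p += 2
-- 	# Phase 2: sum the connection numbers over consecutive prime pairs.
-- 	total = 0
-- 	for q, p in zip(primes, primes[1:]):
-- 		t = 10 ** len(str(q))
-- 		total += ((p - q) * pow(t, p - 2, p)) % p * t + q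
-- 	return total
-- ===== Notes on version B (the rewrite author's own statement) =====
-- stated objective: alternative
-- what changed: A fuses primality scanning and summing in one loop that carries previous_prime through the candidate scan; B is a two-phase pipeline that first collects the list of consecutive primes (5 up to the first prime exceeding n, capped at 2n) and then sums the connection numbers over zipped adjacent pairs, with the same Miller-Rabin helper and modular arithmetic.
import Mathlib
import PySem

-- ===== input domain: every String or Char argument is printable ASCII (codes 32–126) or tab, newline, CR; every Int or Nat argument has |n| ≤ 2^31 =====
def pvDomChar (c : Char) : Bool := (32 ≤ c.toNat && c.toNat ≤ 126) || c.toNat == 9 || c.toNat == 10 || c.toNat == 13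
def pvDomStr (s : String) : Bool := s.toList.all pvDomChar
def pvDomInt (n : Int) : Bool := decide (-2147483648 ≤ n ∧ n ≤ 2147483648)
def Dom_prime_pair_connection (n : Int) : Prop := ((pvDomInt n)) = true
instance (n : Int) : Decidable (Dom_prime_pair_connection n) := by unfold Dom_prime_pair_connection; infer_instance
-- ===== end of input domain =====

-- B replaces A's fused loop (carrying previous_prime through the candidate scan) by a
-- two-phase pipeline: collect the consecutive primes first, then sum the connection
-- numbers over adjacent pairs; objective: alternative (same cost, same values).

-- ===== PORT A =====
-- helper is_prime (Miller-Rabin), shared text of Source A and Source B, ported once.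
-- while d % 2 == 0: r += 1; d //= 2   (0 < d added only for termination; d = m-1 > 0 at the call)
def ppcStrip (r d : Int) : Int × Int :=
  if h : 0 < d ∧ PySem.Int.mod d 2 = 0 then ppcStrip (r + 1) (PySem.Int.floordiv d 2) else (r, d)
  termination_by d.toNat
  decreasing_by
    rw [PySem.Int.floordiv_eq_ediv_of_pos (by norm_num)]
    omega

def ppcBases : List Int :=
  [2, 3, 5, 7, 11, 13, 17, 19, 23, 29, 31, 37, 41, 43, 47, 53, 59, 61, 67, 71, 73, 79, 83, 89, 97]

-- the 'for a in bases' loop with its break/continue/return; pow(a, d, n) is PySem.Int.powMod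
-- (exponents d and r-1 are ≥ 0 wherever Python evaluates them, so .toNat is exact)
def ppcMR (n d r : Int) : List Int → Bool
  | [] => true
  | a :: rest =>
    if a ≥ n then true
    else
      let x := PySem.Int.powMod a d.toNat n
      let x := (List.range (r - 1).toNat).foldl (fun y _ => PySem.Int.mod (y * y) n) x
      if x = 1 ∨ x = n - 1 then ppcMR n d r rest else false

def ppcIsPrime (m : Int) : Bool :=
  if m < 2 then false
  else if m = 2 ∨ m = 3 then true
  else if PySem.Int.mod m 2 = 0 then false
  else
    let rd := ppcStrip 0 (m - 1)
    ppcMR m rd.2 rd.1 ppcBases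

-- A's main loop over range(7, 2*n, 2) with state (ans, previous_prime); break / continue
-- become the explicit recursion; 10 ** len(str(prev)) is 10 ^ (toChars prev).length (exact).
def ppcLoopA (n : Int) : List Int → Int → Int → Int
  | [], ans, _ => ans
  | p :: rest, ans, prev =>
    if prev > n then ans
    else if ppcIsPrime p = false then ppcLoopA n rest ans prev
    else
      let t : Int := (10 : Int) ^ (PySem.Int.toChars prev).length
      let x := PySem.Int.mod ((p - prev) * PySem.Int.powMod t (p - 2).toNat p) p
      let z := x * t + prev
      ppcLoopA n rest (ans + z) p

def prime_pair_connection (n : Int) : Int :=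
  ppcLoopA n (PySem.List.pyRange 7 (2 * n) 2) 0 5

-- ===== PORT B =====
-- phase 1 of Source B: while primes[-1] <= n and p < 2*n: append p if prime, p += 2.
-- primes[-1] is pyGet? … (-1) (never none here: the list starts as [5]; .getD 0 only totalises).
def ppcCollect (n p : Int) (primes : List Int) : List Int :=
  if h : ((PySem.List.pyGet? primes (-1)).getD 0) ≤ n ∧ p < 2 * n then
    if ppcIsPrime p then ppcCollect n (p + 2) (primes ++ [p]) else ppcCollect n (p + 2) primes
  else primes
  termination_by (2 * n - p).toNat
  decreasing_by all_goals omega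

-- the summand of Source B's second loop: ((p - q) * pow(t, p - 2, p)) % p * t + q, t = 10 ** len(str(q))
def ppcTerm (q p : Int) : Int :=
  let t : Int := (10 : Int) ^ (PySem.Int.toChars q).length
  PySem.Int.mod ((p - q) * PySem.Int.powMod t (p - 2).toNat p) p * t + q

-- phase 2: for q, p in zip(primes, primes[1:]): total += …   (primes[1:] = drop 1, exact)
def prime_pair_connection_alt (n : Int) : Int :=
  let primes := ppcCollect n 7 [5]
  (primes.zip (primes.drop 1)).foldl (fun total qp => total + ppcTerm qp.1 qp.2) 0

-- ===== PRECONDITION & SPEC =====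
def Spec_prime_pair_connection (n : Int) (out : Int) : Prop := out = prime_pair_connection_alt n
instance (n : Int) (out : Int) : Decidable (Spec_prime_pair_connection n out) := by unfold Spec_prime_pair_connection; infer_instance

-- ===== CLAIM (what is proved, stated in full; the proofs are below) =====
def Claim_equal_prime_pair_connection : Prop := ∀ (n : Int), Dom_prime_pair_connection n → Spec_prime_pair_connection n (prime_pair_connection n)

-- ===== LEMMAS AND PROOFS =====

-- the tail of primes that B's phase 1 appends, as a function of the current last prime only
def ppcRest (n p last : Int) : List Int :=
  if h : last ≤ n ∧ p < 2 * n then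
    if ppcIsPrime p then p :: ppcRest n (p + 2) p else ppcRest n (p + 2) last
  else []
  termination_by (2 * n - p).toNat
  decreasing_by all_goals omega

-- the pairwise sum over consecutive elements
def ppcSum : List Int → Int
  | q :: p :: rest => ppcTerm q p + ppcSum (p :: rest)
  | _ => 0

lemma ppc_last_append (l : List Int) (x : Int) :
    (PySem.List.pyGet? (l ++ [x]) (-1)).getD 0 = x := by
  simp [PySem.List.pyGet?, PySem.List.pyIdx?]

lemma ppc_range2_nil (a b : Int) (h : b ≤ a) : PySem.List.pyRange a b 2 = [] := by
  rw [PySem.List.pyRange_of_pos a b (by norm_num)]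
  have : ¬ a < b := by omega
  simp [this]

lemma ppc_range2_cons (a b : Int) (h : a < b) :
    PySem.List.pyRange a b 2 = a :: PySem.List.pyRange (a + 2) b 2 := by
  rw [PySem.List.pyRange_of_pos a b (by norm_num),
      PySem.List.pyRange_of_pos (a + 2) b (by norm_num)]
  have hm : ((b - a + 2 - 1) / 2).toNat =
      (if a + 2 < b then ((b - (a + 2) + 2 - 1) / 2).toNat else 0) + 1 := by
    split_ifs with h2 <;> omega
  simp only [h, if_true, hm, List.range_succ_eq_map, List.map_cons, List.map_map]
  congr 1
  · norm_num
  · apply List.map_congr_left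
    intro k _
    simp only [Function.comp_apply, Nat.succ_eq_add_one]
    push_cast
    ring

lemma ppc_collect_eq (n : Int) : ∀ (k : Nat) (p : Int) (pre : List Int) (x : Int),
    (2 * n - p).toNat ≤ k →
    ppcCollect n p (pre ++ [x]) = (pre ++ [x]) ++ ppcRest n p x := by
  intro k
  induction k with
  | zero =>
    intro p pre x hk
    unfold ppcCollect ppcRest
    rw [ppc_last_append]
    have : ¬ p < 2 * n := by omega
    simp [this]
  | succ k ih =>
    intro p pre x hk
    unfold ppcCollect ppcRest
    rw [ppc_last_append]
    by_cases hc : x ≤ n ∧ p < 2 * n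
    · simp only [hc, and_true, dif_pos]
      by_cases hp : ppcIsPrime p
      · simp only [hp, if_true]
        have := ih (p + 2) (pre ++ [x]) p (by omega)
        rw [List.append_assoc] at *
        simpa using this
      · simp only [hp, if_false, Bool.false_eq_true]
        exact ih (p + 2) pre x (by omega)
    · simp [hc]

lemma ppcSum_cons2 (q p : Int) (l : List Int) :
    ppcSum (q :: p :: l) = ppcTerm q p + ppcSum (p :: l) := rfl

lemma ppc_foldl_pairs : ∀ (l : List Int) (acc : Int),
    (l.zip (l.drop 1)).foldl (fun total qp => total + ppcTerm qp.1 qp.2) acc = acc + ppcSum l := by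
  intro l
  induction l with
  | nil => intro acc; simp [ppcSum]
  | cons q l' ih =>
    intro acc
    cases l' with
    | nil => simp [ppcSum]
    | cons p rest =>
      have : (q :: p :: rest).zip ((q :: p :: rest).drop 1) =
          (q, p) :: ((p :: rest).zip ((p :: rest).drop 1)) := by simp
      rw [this, List.foldl_cons, ih, ppcSum_cons2]
      ring

lemma ppc_loop_eq (n : Int) : ∀ (k : Nat) (p prev ans : Int),
    (2 * n - p).toNat ≤ k →
    ppcLoopA n (PySem.List.pyRange p (2 * n) 2) ans prev
      = ans + ppcSum (prev :: ppcRest n p prev) := by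
  intro k
  induction k with
  | zero =>
    intro p prev ans hk
    have h2n : ¬ p < 2 * n := by omega
    rw [ppc_range2_nil p (2 * n) (by omega)]
    unfold ppcRest
    simp [h2n, ppcLoopA, ppcSum]
  | succ k ih =>
    intro p prev ans hk
    by_cases h2n : p < 2 * n
    · rw [ppc_range2_cons p (2 * n) h2n]
      unfold ppcRest
      by_cases hprev : prev > n
      · have : ¬ (prev ≤ n ∧ p < 2 * n) := by omega
        simp [ppcLoopA, hprev, this, ppcSum]
      · have hcond : prev ≤ n ∧ p < 2 * n := ⟨by omega, h2n⟩
        by_cases hp : ppcIsPrime p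
        · simp only [ppcLoopA, hprev, if_false, hp, if_true, Bool.true_eq_false]
          rw [ih (p + 2) p _ (by omega)]
          simp only [hcond]
          show ans + (PySem.Int.mod ((p - prev) * PySem.Int.powMod ((10:Int) ^ (PySem.Int.toChars prev).length) (p-2).toNat p) p * ((10:Int) ^ (PySem.Int.toChars prev).length) + prev)
                + ppcSum (p :: ppcRest n (p + 2) p)
              = ans + ppcSum (prev :: p :: ppcRest n (p + 2) p)
          rw [ppcSum_cons2]
          unfold ppcTerm
          ring
        · simp only [ppcLoopA, hprev, if_false, hp, Bool.false_eq_true]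
          simp only [Bool.not_eq_true] at hp
          simp only [if_true]
          rw [ih (p + 2) prev ans (by omega)]
          simp [hcond]
    · rw [ppc_range2_nil p (2 * n) (by omega)]
      unfold ppcRest
      simp [h2n, ppcLoopA, ppcSum]

-- ===== VERDICT (by name: the statement is the Claim_ definition above) =====
theorem prime_pair_connection_spec : Claim_equal_prime_pair_connection := by
  intro n _
  unfold Spec_prime_pair_connection prime_pair_connection prime_pair_connection_alt
  rw [ppc_loop_eq n (2 * n - 7).toNat 7 5 0 (by omega)]
  have hc : ppcCollect n 7 [5] = [5] ++ ppcRest n 7 5 := by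
    have := ppc_collect_eq n (2 * n - 7).toNat 7 [] 5 (by omega)
    simpa using this
  rw [hc]
  rw [ppc_foldl_pairs]
  simp
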